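-- pv_equiv track=rewrite | github.com/Hanyang97/UROP | utils.py | find_session_rank
-- ===== SOURCE A (Python) =====
-- def make_seq_list(n, sessions_list):
--     """
--     create list of sequences of length n in a session
--     """
--     seq_list = []
--     for seq in sessions_list:
--         if len(seq) >= n:
--             for m in range(len(seq)-n+1):
--                 seq_list += [tuple(seq[m:m+n])]
--
--     return seq_list
--
-- def find_session_rank(sessions_list, seq_rank_list):
--     """
--     find the ranks of sessions
--     :param sessions_list: list of sessions
--     :param seq_rank_list: list of rank of sequences
--
--     :return session_rank_list: if unseen, rank it to unseen_rank
--     """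
--     seq_len = len(seq_rank_list[0][0])
--     unseen_rank = seq_rank_list[-1][1]+1
--     session_seq_list = [make_seq_list(
--         seq_len, [sessions_list[i]]) for i in range(len(sessions_list))]
--     session_rank_list = [-1 for i in session_seq_list]
--     for idx, seqs in enumerate(session_seq_list):
--         for seq, rank in seq_rank_list:
--             if seq in seqs:
--                 session_rank_list[idx] = rank
--                 break
--
--     session_rank_list = [i if i != -
--                          1 else unseen_rank for i in session_rank_list]
--
--     return session_rank_list
-- ===== SOURCE B (Python) =====
-- def find_session_rank(sessions_list, seq_rank_list):
--     seq_len = len(seq_rank_list[0][0])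
--     unseen_rank = seq_rank_list[-1][1] + 1
--     first = {}
--     for pos, (seq, rank) in enumerate(seq_rank_list):
--         if seq not in first:
--             first[seq] = (pos, rank)
--     result = []
--     for session in sessions_list:
--         best = None
--         for m in range(len(session) - seq_len + 1):
--             hit = first.get(tuple(session[m:m + seq_len]))
--             if hit is not None and (best is None or hit[0] < best[0]):
--                 best = hit
--         rank = best[1] if best is not None else -1
--         result.append(rank if rank != -1 else unseen_rank)
--     return result
-- ===== Notes on version B (the rewrite author's own statement) =====
-- stated objective: alternative
-- what changed: A scans the whole seq_rank_list per session with a linear membership test in the session's window list inside it; B builds a first-occurrence dict (seq -> (position, rank)) once and then makes a single pass over each session's windows keeping the hit with the smallest position, so the inner scan over seq_rank_list disappears.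
import Mathlib
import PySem

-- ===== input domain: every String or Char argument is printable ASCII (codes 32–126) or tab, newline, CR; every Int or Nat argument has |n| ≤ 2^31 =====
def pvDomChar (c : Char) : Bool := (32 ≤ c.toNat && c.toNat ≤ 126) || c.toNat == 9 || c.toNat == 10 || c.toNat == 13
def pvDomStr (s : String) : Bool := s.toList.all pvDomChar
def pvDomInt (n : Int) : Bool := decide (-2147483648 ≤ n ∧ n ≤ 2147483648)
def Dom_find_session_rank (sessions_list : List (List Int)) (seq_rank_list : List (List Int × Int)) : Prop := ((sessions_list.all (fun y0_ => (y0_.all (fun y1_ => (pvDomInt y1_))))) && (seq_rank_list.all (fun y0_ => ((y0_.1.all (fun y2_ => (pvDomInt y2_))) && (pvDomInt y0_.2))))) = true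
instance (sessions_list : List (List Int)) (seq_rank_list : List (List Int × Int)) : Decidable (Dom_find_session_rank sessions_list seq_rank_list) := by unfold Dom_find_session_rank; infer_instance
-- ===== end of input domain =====

-- B replaces A's per-session scan of the whole rank list (with a linear membership
-- test in the session's window list inside it) by one first-occurrence dict built
-- once over seq_rank_list plus a single min-position pass over each session's
-- windows; objective: alternative (different algorithm, not measured ≥1.5x faster).

-- ===== PORT A =====
-- helper make_seq_list: windows ('tuples') of length n of each session, in order
def make_seq_list (n : Nat) (sessions_list : List (List Int)) : List (List Int) :=
  sessions_list.foldl
    (fun seq_list seq =>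
      if n ≤ seq.length then
        seq_list ++ (List.range (seq.length - n + 1)).map
          (fun (m : Nat) => PySem.List.slice seq (some (m : Int)) (some ((m : Int) + (n : Int))))
      else seq_list) []

-- A's inner 'for seq, rank in seq_rank_list: if seq in seqs: …; break' with the -1 the cell keeps
def firstRankA (seqs : List (List Int)) (srl : List (List Int × Int)) : Int :=
  match srl with
  | [] => -1
  | (seq, rank) :: t => if seq ∈ seqs then rank else firstRankA seqs t

-- seq_rank_list[0] / seq_rank_list[-1] raise IndexError on []; Pre_ excludes that input
def find_session_rank (sessions_list : List (List Int)) (seq_rank_list : List (List Int × Int)) : List Int :=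
  let seq_len := (seq_rank_list.headD ([], 0)).1.length
  let unseen_rank := (seq_rank_list.getLastD ([], 0)).2 + 1
  let session_seq_list := sessions_list.map (fun s => make_seq_list seq_len [s])
  let session_rank_list := session_seq_list.map (fun seqs => firstRankA seqs seq_rank_list)
  session_rank_list.map (fun i => if i ≠ -1 then i else unseen_rank)

-- ===== PORT B =====
-- 'for pos, (seq, rank) in enumerate(seq_rank_list): if seq not in first: first[seq] = (pos, rank)'
def buildFirst (pos : Int) (srl : List (List Int × Int)) (d : PySem.Dict (List Int) (Int × Int)) :
    PySem.Dict (List Int) (Int × Int) :=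
  match srl with
  | [] => d
  | (seq, rank) :: t =>
      buildFirst (pos + 1) t (if d.contains seq then d else d.insert seq (pos, rank))

-- one step of B's window loop: look the window up, keep the hit with the smaller position
def bestStep (first : PySem.Dict (List Int) (Int × Int)) (session : List Int) (n : Int)
    (best : Option (Int × Int)) (m : Int) : Option (Int × Int) :=
  match first.get? (PySem.List.slice session (some m) (some (m + n))) with
  | none => best
  | some hit =>
      match best with
      | none => some hit
      | some b => if hit.1 < b.1 then some hit else best

def find_session_rank_alt (sessions_list : List (List Int)) (seq_rank_list : List (List Int × Int)) : List Int :=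
  let seq_len := (seq_rank_list.headD ([], 0)).1.length
  let unseen_rank := (seq_rank_list.getLastD ([], 0)).2 + 1
  let first := buildFirst 0 seq_rank_list PySem.Dict.empty
  sessions_list.map (fun session =>
    let best := (PySem.List.pyRange 0 ((session.length : Int) - (seq_len : Int) + 1)).foldl
      (bestStep first session (seq_len : Int)) none
    let rank := match best with | some b => b.2 | none => -1
    if rank ≠ -1 then rank else unseen_rank)

-- ===== PRECONDITION & SPEC =====
-- Pre_ excludes only seq_rank_list = [], on which Python A raises IndexError (seq_rank_list[0]).
def Pre_find_session_rank (sessions_list : List (List Int)) (seq_rank_list : List (List Int × Int)) : Prop :=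
  seq_rank_list ≠ []
instance (sessions_list : List (List Int)) (seq_rank_list : List (List Int × Int)) : Decidable (Pre_find_session_rank sessions_list seq_rank_list) := by unfold Pre_find_session_rank; infer_instance

def pvWitness_find_session_rank : List (List Int) × (List (List Int × Int)) :=
  ([[1, 2, 3], []], [([2, 3], 0), ([9], 1)])

def Spec_find_session_rank (sessions_list : List (List Int)) (seq_rank_list : List (List Int × Int)) (out : List Int) : Prop := out = find_session_rank_alt sessions_list seq_rank_list
instance (sessions_list : List (List Int)) (seq_rank_list : List (List Int × Int)) (out : List Int) : Decidable (Spec_find_session_rank sessions_list seq_rank_list out) := by unfold Spec_find_session_rank; infer_instance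

-- ===== CLAIM (what is proved, stated in full; the proofs are below) =====
def Claim_equal_find_session_rank : Prop := ∀ (sessions_list : List (List Int)) (seq_rank_list : List (List Int × Int)), Dom_find_session_rank sessions_list seq_rank_list → Pre_find_session_rank sessions_list seq_rank_list → Spec_find_session_rank sessions_list seq_rank_list (find_session_rank sessions_list seq_rank_list)

-- ===== LEMMAS AND PROOFS =====

-- first occurrence of key w in srl, with its position (counting from p) and rank
def occ (p : Int) (srl : List (List Int × Int)) (w : List Int) : Option (Int × Int) :=
  match srl with
  | [] => none
  | (k, r) :: t => if k = w then some (p, r) else occ (p + 1) t w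

-- first pair of srl whose key lies in ws, with its position (counting from p) and rank
def firstHit (p : Int) (srl : List (List Int × Int)) (ws : List (List Int)) : Option (Int × Int) :=
  match srl with
  | [] => none
  | (k, r) :: t => if k ∈ ws then some (p, r) else firstHit (p + 1) t ws

-- B's fold step, abstracted over the lookup function
def stepg (g : List Int → Option (Int × Int)) (best : Option (Int × Int)) (w : List Int) :
    Option (Int × Int) :=
  match g w with
  | none => best
  | some hit =>
      match best with
      | none => some hit
      | some b => if hit.1 < b.1 then some hit else best

theorem buildFirst_get? (srl : List (List Int × Int)) (p : Int)
    (d : PySem.Dict (List Int) (Int × Int)) (w : List Int) :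
    (buildFirst p srl d).get? w =
      (match d.get? w with | some v => some v | none => occ p srl w) := by
  induction srl generalizing p d with
  | nil => simp [buildFirst, occ]; cases d.get? w <;> rfl
  | cons hd t ih =>
    obtain ⟨k, r⟩ := hd
    by_cases hc : d.contains k = true
    · have hks : (d.get? k).isSome := by rw [← PySem.Dict.contains_eq_isSome_get?]; exact hc
      simp only [buildFirst, hc, if_true, occ]
      rw [ih]
      by_cases hkw : k = w
      · subst hkw
        obtain ⟨v, hv⟩ := Option.isSome_iff_exists.mp hks
        simp [hv]
      · simp [hkw]
    · simp only [buildFirst, hc, Bool.false_eq_true, if_false, occ]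
      rw [ih]
      by_cases hkw : k = w
      · subst hkw
        have hnone : d.get? k = none := by
          cases hg : d.get? k with
          | none => rfl
          | some v => rw [PySem.Dict.contains_eq_isSome_get?, hg] at hc; simp at hc
        rw [PySem.Dict.get?_insert]
        simp [hnone]
      · rw [PySem.Dict.get?_insert]
        simp [hkw, Ne.symm hkw]

theorem occ_pos_le (srl : List (List Int × Int)) (p : Int) (w : List Int) (v : Int × Int)
    (h : occ p srl w = some v) : p ≤ v.1 := by
  induction srl generalizing p with
  | nil => simp [occ] at h
  | cons hd t ih =>
    obtain ⟨k, r⟩ := hd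
    simp only [occ] at h
    by_cases hk : k = w
    · rw [if_pos hk] at h
      injection h with h
      rw [← h]
    · rw [if_neg hk] at h
      have := ih (p + 1) h
      omega

theorem firstRankA_eq_firstHit (srl : List (List Int × Int)) (p : Int) (ws : List (List Int)) :
    firstRankA ws srl = (match firstHit p srl ws with | some b => b.2 | none => -1) := by
  induction srl generalizing p with
  | nil => simp [firstRankA, firstHit]
  | cons hd t ih =>
    obtain ⟨k, r⟩ := hd
    by_cases hk : k ∈ ws
    · simp [firstRankA, firstHit, hk]
    · simp only [firstRankA, firstHit, hk, if_false]
      exact ih (p + 1)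

theorem foldl_stepg_none (g : List Int → Option (Int × Int)) (ws : List (List Int))
    (b0 : Option (Int × Int)) (hg : ∀ w ∈ ws, g w = none) :
    ws.foldl (stepg g) b0 = b0 := by
  induction ws generalizing b0 with
  | nil => rfl
  | cons w t ih =>
    have hw : g w = none := hg w (by simp)
    simp only [List.foldl_cons, stepg, hw]
    exact ih b0 (fun x hx => hg x (by simp [hx]))

theorem foldl_stepg_stay (g : List Int → Option (Int × Int)) (ws : List (List Int))
    (p r : Int) (hg : ∀ w ∈ ws, ∀ v, g w = some v → p ≤ v.1) :
    ws.foldl (stepg g) (some (p, r)) = some (p, r) := by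
  induction ws with
  | nil => rfl
  | cons w t ih =>
    have hstep : stepg g (some (p, r)) w = some (p, r) := by
      unfold stepg
      cases hw : g w with
      | none => rfl
      | some hit =>
        have := hg w (by simp) hit hw
        simp only
        rw [if_neg (by omega)]
    rw [List.foldl_cons, hstep]
    exact ih (fun x hx v hv => hg x (by simp [hx]) v hv)

theorem foldl_stepg_reach (g : List Int → Option (Int × Int)) (ws : List (List Int))
    (p r : Int) (b0 : Option (Int × Int))
    (hb0 : b0 = none ∨ ∃ v, b0 = some v ∧ p < v.1)
    (hall : ∀ w ∈ ws, ∀ v, g w = some v → v = (p, r) ∨ p < v.1)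
    (hex : ∃ w ∈ ws, g w = some (p, r)) :
    ws.foldl (stepg g) b0 = some (p, r) := by
  induction ws generalizing b0 with
  | nil => simp at hex
  | cons w t ih =>
    have halll : ∀ x ∈ t, ∀ v, g x = some v → v = (p, r) ∨ p < v.1 :=
      fun x hx v hv => hall x (by simp [hx]) v hv
    by_cases hw : g w = some (p, r)
    · have hstep : stepg g b0 w = some (p, r) := by
        unfold stepg
        rw [hw]
        rcases hb0 with h0 | ⟨v, hv, hlt⟩
        · rw [h0]
        · rw [hv]; simp only; rw [if_pos (by omega)]
      rw [List.foldl_cons, hstep]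
      exact foldl_stepg_stay g t p r (fun x hx v hv => by
        rcases halll x hx v hv with h | h
        · rw [h]
        · omega)
    · have hex' : ∃ x ∈ t, g x = some (p, r) := by
        rcases hex with ⟨x, hx, hgx⟩
        rcases List.mem_cons.mp hx with rfl | hxt
        · exact absurd hgx hw
        · exact ⟨x, hxt, hgx⟩
      have hb' : stepg g b0 w = none ∨ ∃ v, stepg g b0 w = some v ∧ p < v.1 := by
        unfold stepg
        cases hgw : g w with
        | none => exact hb0
        | some hit =>
          have hhit : p < hit.1 := by
            rcases hall w (by simp) hit hgw with h | h
            · exact absurd (hgw.trans (by rw [h])) hw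
            · exact h
          rcases hb0 with h0 | ⟨v, hv, hlt⟩
          · rw [h0]; exact Or.inr ⟨hit, rfl, hhit⟩
          · rw [hv]
            simp only
            by_cases hc : hit.1 < v.1
            · rw [if_pos hc]; exact Or.inr ⟨hit, rfl, hhit⟩
            · rw [if_neg hc]; exact Or.inr ⟨v, rfl, hlt⟩
      rw [List.foldl_cons]
      exact ih (stepg g b0 w) hb' halll hex'

theorem foldl_stepg_occ (srl : List (List Int × Int)) (p : Int) (ws : List (List Int)) :
    ws.foldl (stepg (occ p srl)) none = firstHit p srl ws := by
  induction srl generalizing p ws with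
  | nil =>
    rw [foldl_stepg_none]
    · rfl
    · intro w _; rfl
  | cons hd t ih =>
    obtain ⟨k, r⟩ := hd
    by_cases hk : k ∈ ws
    · have hfh : firstHit p ((k, r) :: t) ws = some (p, r) := by simp [firstHit, hk]
      rw [hfh]
      apply foldl_stepg_reach
      · exact Or.inl rfl
      · intro w _ v hv
        simp only [occ] at hv
        by_cases hkw : k = w
        · rw [if_pos hkw] at hv; exact Or.inl (by injection hv with h; rw [← h])
        · rw [if_neg hkw] at hv
          have := occ_pos_le t (p + 1) w v hv
          omega
      · refine ⟨k, hk, ?_⟩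
        simp [occ]
    · have hcongr : ws.foldl (stepg (occ p ((k, r) :: t))) none =
          ws.foldl (stepg (occ (p + 1) t)) none := by
        apply PySem.List.foldl_congr_mem'
        intro x hx acc
        have hkx : k ≠ x := fun h => hk (h ▸ hx)
        unfold stepg
        simp only [occ, if_neg hkx]
      rw [hcongr, ih (p + 1)]
      simp [firstHit, hk]

-- A's window list for one session equals the list B's window loop traverses
theorem windows_eq (n : Nat) (s : List Int) :
    make_seq_list n [s] =
      (PySem.List.pyRange 0 ((s.length : Int) - (n : Int) + 1)).map
        (fun m => PySem.List.slice s (some m) (some (m + (n : Int)))) := by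
  by_cases h : n ≤ s.length
  · have hK : (((s.length : Int) - (n : Int) + 1) - 0).toNat = s.length - n + 1 := by omega
    rw [PySem.List.pyRange_one, hK, List.map_map]
    simp only [make_seq_list, List.foldl_cons, List.foldl_nil, if_pos h, List.nil_append]
    apply List.map_congr_left
    intro m _
    simp [Function.comp]
  · have hnil : PySem.List.pyRange 0 ((s.length : Int) - (n : Int) + 1) = [] := by
      apply PySem.List.pyRange_one_eq_nil
      omega
    rw [hnil]
    simp [make_seq_list, h]

-- the per-session values agree
theorem per_session_eq (srl : List (List Int × Int)) (n : Nat) (s : List Int) :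
    firstRankA (make_seq_list n [s]) srl =
      (match (PySem.List.pyRange 0 ((s.length : Int) - (n : Int) + 1)).foldl
          (bestStep (buildFirst 0 srl PySem.Dict.empty) s (n : Int)) none with
        | some b => b.2
        | none => -1) := by
  have hfold : (PySem.List.pyRange 0 ((s.length : Int) - (n : Int) + 1)).foldl
      (bestStep (buildFirst 0 srl PySem.Dict.empty) s (n : Int)) none =
      (make_seq_list n [s]).foldl (stepg (occ 0 srl)) none := by
    rw [windows_eq, List.foldl_map]
    apply PySem.List.foldl_congr_mem'
    intro m _ acc
    unfold bestStep stepg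
    rw [buildFirst_get? srl 0 PySem.Dict.empty, PySem.Dict.get?_empty]
  rw [hfold, foldl_stepg_occ srl 0 (make_seq_list n [s])]
  rw [firstRankA_eq_firstHit srl 0 (make_seq_list n [s])]

-- ===== VERDICT (by name: the statement is the Claim_ definition above) =====
theorem find_session_rank_spec : Claim_equal_find_session_rank := by
  intro sessions_list seq_rank_list _ _
  unfold Spec_find_session_rank find_session_rank find_session_rank_alt
  simp only [List.map_map]
  apply List.map_congr_left
  intro s _
  simp only [Function.comp_apply]
  rw [per_session_eq seq_rank_list ((seq_rank_list.headD ([], 0)).1.length) s]
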